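-- pv_equiv track=rewrite | github.com/feitenglee/target_offer | 20_表示数值的字符串.py | scan_digit
-- ===== SOURCE A (Python) =====
-- def scan_digit(s):
--     dot_num = 0
--     allow_val = ['0','1','2','3','4','5','6','7','8','9','+','-','.']
--     for i in range(len(s)):
--         if s[i] not in allow_val:
--             return False
--         if s[i] == '.':
--             dot_num += 1
--         if s[i] in '+-' and i != 0:
--             return False
--     if dot_num > 1:
--         return False
--     return True
-- ===== SOURCE B (Python) =====
-- def scan_digit(s):
--     return (set(s) <= set('0123456789+-.')
--             and s.count('.') <= 1
--             and '+' not in s[1:]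
--             and '-' not in s[1:])
-- ===== Notes on version B (the rewrite author's own statement) =====
-- stated objective: simpler
-- what changed: Replaced the indexed per-character loop with early returns and a running dot counter by three whole-string aggregate checks: charset subset test, dot count <= 1, and no sign character in s[1:].
import Mathlib
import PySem

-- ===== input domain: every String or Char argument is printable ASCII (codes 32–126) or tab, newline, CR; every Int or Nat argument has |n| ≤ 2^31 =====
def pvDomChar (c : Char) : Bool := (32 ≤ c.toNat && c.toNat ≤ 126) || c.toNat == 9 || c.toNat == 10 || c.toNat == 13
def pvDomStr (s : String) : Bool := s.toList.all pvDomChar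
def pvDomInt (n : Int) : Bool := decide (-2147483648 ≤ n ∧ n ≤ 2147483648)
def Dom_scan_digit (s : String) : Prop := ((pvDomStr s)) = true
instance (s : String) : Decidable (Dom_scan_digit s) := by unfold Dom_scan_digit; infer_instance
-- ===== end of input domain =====

-- B replaces A's indexed per-character loop with whole-string aggregate checks
-- (charset subset, dot count ≤ 1, no sign past position 0): objective = simpler.


-- ===== PORT A =====
-- allow_val list from A
def pvAllowA : List Char := ['0','1','2','3','4','5','6','7','8','9','+','-','.']

-- the body of A's for-loop with early returns, recursing over the remaining
-- characters, carrying the index i and dot_num; at the end, A's final check.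
def scanAuxA : List Char → Nat → Nat → Bool
  | [], _, dot => if dot > 1 then false else true
  | c :: rest, i, dot =>
    if ¬ (pvAllowA.contains c = true) then false
    else
      let dot' := if c = '.' then dot + 1 else dot
      if ("+-".toList.contains c = true) ∧ i ≠ 0 then false
      else scanAuxA rest (i + 1) dot'

def scan_digit (s : String) : Bool := scanAuxA s.toList 0 0

-- ===== PORT B =====
-- set(s) <= set('0123456789+-.')  ∧  s.count('.') <= 1  ∧  '+' not in s[1:]  ∧  '-' not in s[1:]
def pvAllowB : List Char := "0123456789+-.".toList

def scan_digit_alt (s : String) : Bool :=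
  let l := s.toList
  l.all (fun c => pvAllowB.contains c)
    && decide (l.count '.' ≤ 1)
    && !(l.drop 1).contains '+'
    && !(l.drop 1).contains '-'

-- ===== PRECONDITION & SPEC =====
def Spec_scan_digit (s : String) (out : Bool) : Prop := out = scan_digit_alt s
instance (s : String) (out : Bool) : Decidable (Spec_scan_digit s out) := by unfold Spec_scan_digit; infer_instance

-- ===== CLAIM (what is proved, stated in full; the proofs are below) =====
def Claim_equal_scan_digit : Prop := ∀ (s : String), Dom_scan_digit s → Spec_scan_digit s (scan_digit s)

-- ===== LEMMAS AND PROOFS =====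

-- past index 0, A's loop is a pure conjunction: every remaining char is an
-- allowed non-sign char, and the final dot total is at most 1
theorem pm_toList : "+-".toList = ['+', '-'] := by decide

theorem scanAuxA_pos (l : List Char) : ∀ (i dot : Nat), i ≠ 0 →
    scanAuxA l i dot
      = (l.all (fun c => pvAllowA.contains c && !(c == '+') && !(c == '-'))
          && decide (dot + l.count '.' ≤ 1)) := by
  induction l with
  | nil =>
    intro i dot _
    simp only [scanAuxA, List.all_nil, List.count_nil, Bool.true_and, Nat.zero_add]
    by_cases h : 1 < dot <;> simp [h] <;> omega
  | cons c rest ih =>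
    intro i dot hi
    simp only [scanAuxA, pm_toList]
    by_cases hc : pvAllowA.contains c = true
    · have hc' : decide (c ∈ pvAllowA) = true := by simpa using hc
      simp only [hc, not_true, if_false]
      by_cases hs : (['+', '-'].contains c = true)
      · have : ((['+', '-'].contains c = true) ∧ i ≠ 0) := ⟨hs, hi⟩
        rw [if_pos this]
        have hcp : c = '+' ∨ c = '-' := by simpa using hs
        cases hcp with
        | inl h => subst h; simp [List.all_cons]
        | inr h => subst h; simp [List.all_cons]
      · rw [if_neg (fun h => hs h.1)]
        rw [ih (i + 1) _ (by omega)]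
        have hnp : ¬ c = '+' ∧ ¬ c = '-' := by
          constructor <;> intro h <;> exact hs (by simp [h])
        have hp : (c == '+') = false := by simp [hnp.1]
        have hm : (c == '-') = false := by simp [hnp.2]
        by_cases hd : c = '.'
        · subst hd
          rw [if_pos rfl]
          have hcount : List.count '.' ('.' :: rest) = rest.count '.' + 1 := by simp
          simp only [List.all_cons, hc, hp, hm, Bool.not_false, Bool.true_and, hcount]
          congr 1
          exact decide_eq_decide.mpr (by omega)
        · rw [if_neg hd]
          have hcount : List.count '.' (c :: rest) = rest.count '.' := by
            simp [List.count_cons, hd]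
          simp only [List.all_cons, hc, hp, hm, Bool.not_false, Bool.true_and, hcount]
    · have hc2 : decide (c ∈ pvAllowA) = false := by
        simpa [List.contains_eq_mem] using hc
      simp [List.all_cons, List.contains_eq_mem, hc2]

theorem all_split (l : List Char) :
    l.all (fun c => pvAllowA.contains c && !(c == '+') && !(c == '-'))
      = (l.all (fun c => pvAllowA.contains c) && !l.contains '+' && !l.contains '-') := by
  induction l with
  | nil => rfl
  | cons c rest ih =>
    simp only [List.all_cons, List.contains_cons, ih]
    have h1 : ('+' == c) = (c == '+') := by rw [Bool.beq_comm]
    have h2 : ('-' == c) = (c == '-') := by rw [Bool.beq_comm]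
    rw [h1, h2]
    cases hx : pvAllowA.contains c <;> cases hy : c == '+' <;> cases hz : c == '-' <;>
      cases rest.all (fun c => pvAllowA.contains c) <;>
      cases rest.contains '+' <;> cases rest.contains '-' <;> rfl

-- ===== VERDICT (by name: the statement is the Claim_ definition above) =====
theorem scan_digit_spec : Claim_equal_scan_digit := by
  intro s _
  show scan_digit s = scan_digit_alt s
  unfold scan_digit scan_digit_alt
  have hAB : pvAllowB = pvAllowA := by decide
  rw [hAB]
  cases hl : s.toList with
  | nil => simp [scanAuxA]
  | cons c rest =>
    simp only [scanAuxA]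
    by_cases hc : pvAllowA.contains c = true
    · have hc' : decide (c ∈ pvAllowA) = true := by simpa using hc
      simp only [hc, not_true, if_false]
      rw [if_neg (by simp)]
      rw [scanAuxA_pos rest 1 _ (by omega), all_split]
      by_cases hd : c = '.'
      · subst hd
        rw [if_pos rfl]
        have hcount : List.count '.' ('.' :: rest) = rest.count '.' + 1 := by simp
        have harith : decide (1 + rest.count '.' ≤ 1) = decide (rest.count '.' + 1 ≤ 1) :=
          decide_eq_decide.mpr (by omega)
        simp only [List.all_cons, hc', Bool.true_and, hcount, List.drop_succ_cons,
          List.drop_zero, List.contains_eq_mem, harith]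
        cases rest.all (fun c => decide (c ∈ pvAllowA)) <;>
          cases decide ('+' ∈ rest) <;> cases decide ('-' ∈ rest) <;>
          cases decide (rest.count '.' + 1 ≤ 1) <;> rfl
      · rw [if_neg hd]
        have hcount : List.count '.' (c :: rest) = rest.count '.' := by simp [hd]
        simp only [List.all_cons, hc', Bool.true_and, hcount, List.drop_succ_cons,
          List.drop_zero, List.contains_eq_mem, Nat.zero_add]
        cases rest.all (fun c => decide (c ∈ pvAllowA)) <;>
          cases decide ('+' ∈ rest) <;> cases decide ('-' ∈ rest) <;>
          cases decide (rest.count '.' ≤ 1) <;> rfl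
    · have hc2 : decide (c ∈ pvAllowA) = false := by
        simpa [List.contains_eq_mem] using hc
      simp [List.all_cons, List.contains_eq_mem, hc2]
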